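-- pv_equiv track=rewrite | github.com/rafael-freitass/safaricatch | src/modules/instrucoes/text_functions.py | container_retangulo
-- ===== SOURCE A (Python) =====
-- def container_retangulo(altura, largura):
--     m = []
--     for i in range(altura):
--         m.append([])
--         for j in range(largura):
--             # Caracteres da primeira linha
--             if (i == 0):
--                 if (j == 0):
--                     m[i].append('╒')
--                 elif (j == largura-1):
--                     m[i].append('╕')
--                 else:
--                     m[i].append('═')
--
--             # Caracteres da última linha
--             elif (i == altura-1):
--                 if (j == 0):
--                     m[i].append('╘')
--                 elif (j == largura-1):
--                     m[i].append('╛')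
--                 else:
--                     m[i].append('═')
--
--             # Caracteres de preenchimento
--             else:
--                 if (j == 0):
--                     m[i].append('│')
--                 elif (j == largura-1):
--                     m[i].append('│')
--                 else:
--                     m[i].append(' ')
--     return m
-- ===== SOURCE B (Python) =====
-- def container_retangulo(altura, largura):
--     if altura <= 0:
--         return []
--     if largura <= 0:
--         return [[] for _ in range(altura)]
--
--     def hrow(left, mid, right):
--         row = [mid] * largura
--         row[-1] = right
--         row[0] = left
--         return row
--
--     top = hrow('╒', '═', '╕')
--     if altura == 1:
--         return [top]
--     bottom = hrow('╘', '═', '╛')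
--     side = hrow('│', ' ', '│')
--     return [top] + [side[:] for _ in range(altura - 2)] + [bottom]
-- ===== Notes on version B (the rewrite author's own statement) =====
-- stated objective: simpler
-- what changed: B replaces A's nested per-cell branch loops by building each distinct row kind once (fill row, then overwrite right and left ends) and concatenating [top] ++ interior rows ++ [bottom]; the per-cell branch chain disappears.
import Mathlib
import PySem

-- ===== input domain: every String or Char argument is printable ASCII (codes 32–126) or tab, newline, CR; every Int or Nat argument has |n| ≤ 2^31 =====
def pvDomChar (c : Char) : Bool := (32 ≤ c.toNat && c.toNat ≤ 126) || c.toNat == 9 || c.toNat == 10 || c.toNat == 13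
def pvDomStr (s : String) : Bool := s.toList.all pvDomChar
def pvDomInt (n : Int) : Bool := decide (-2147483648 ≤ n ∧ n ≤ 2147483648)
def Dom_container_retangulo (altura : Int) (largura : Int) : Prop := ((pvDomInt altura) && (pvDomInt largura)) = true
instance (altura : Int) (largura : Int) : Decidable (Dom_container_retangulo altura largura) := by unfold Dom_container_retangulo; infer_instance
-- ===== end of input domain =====

-- B builds the three distinct row kinds once and concatenates [top] ++ sides ++ [bottom]
-- instead of A's per-cell nested branch loops (objective: simpler).

-- ===== PORT A =====
-- nested loops: each cell decided by the i/j branch chain; m[i].append ported as building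
-- the freshly appended row by a fold and appending it.
def container_retangulo (altura : Int) (largura : Int) : List (List String) :=
  (PySem.List.pyRange 0 altura 1).foldl (fun m i =>
    m ++ [(PySem.List.pyRange 0 largura 1).foldl (fun row j =>
      row ++ [if i == 0 then
                (if j == 0 then "╒" else if j == largura - 1 then "╕" else "═")
              else if i == altura - 1 then
                (if j == 0 then "╘" else if j == largura - 1 then "╛" else "═")
              else
                (if j == 0 then "│" else if j == largura - 1 then "│" else " ")]) []]) []

-- ===== PORT B =====
-- hrow: [mid]*largura, then row[-1]=right, row[0]=left; only called with largura ≥ 1,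
-- so row[-1] is index largura-1 (exact).
def hrowAlt (largura : Int) (left mid right : String) : List String :=
  (((List.replicate largura.toNat mid).set (largura - 1).toNat right).set 0 left)

def container_retangulo_alt (altura : Int) (largura : Int) : List (List String) :=
  if altura ≤ 0 then []
  else if largura ≤ 0 then (PySem.List.pyRange 0 altura 1).map (fun _ => ([] : List String))
  else
    let top := hrowAlt largura "╒" "═" "╕"
    if altura == 1 then [top]
    else
      let bottom := hrowAlt largura "╘" "═" "╛"
      let side := hrowAlt largura "│" " " "│"
      [top] ++ List.replicate (altura - 2).toNat side ++ [bottom]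

-- ===== PRECONDITION & SPEC =====
def Spec_container_retangulo (altura : Int) (largura : Int) (out : List (List String)) : Prop := out = container_retangulo_alt altura largura
instance (altura : Int) (largura : Int) (out : List (List String)) : Decidable (Spec_container_retangulo altura largura out) := by unfold Spec_container_retangulo; infer_instance

-- ===== CLAIM (what is proved, stated in full; the proofs are below) =====
def Claim_equal_container_retangulo : Prop := ∀ (altura : Int) (largura : Int), Dom_container_retangulo altura largura → Spec_container_retangulo altura largura (container_retangulo altura largura)

-- ===== LEMMAS AND PROOFS =====

-- A as a double map
lemma contA_eq_map (altura largura : Int) :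
    container_retangulo altura largura =
      (PySem.List.pyRange 0 altura 1).map (fun i =>
        (PySem.List.pyRange 0 largura 1).map (fun j =>
          if i == 0 then
            (if j == 0 then "╒" else if j == largura - 1 then "╕" else "═")
          else if i == altura - 1 then
            (if j == 0 then "╘" else if j == largura - 1 then "╛" else "═")
          else
            (if j == 0 then "│" else if j == largura - 1 then "│" else " ")) ) := by
  unfold container_retangulo
  rw [PySem.List.foldl_append_singleton_eq_map]
  simp only [List.nil_append]
  refine List.map_congr_left (fun i _ => ?_)
  rw [PySem.List.foldl_append_singleton_eq_map]
  simp

-- one bordered row equals A's per-cell branch row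
lemma row_eq (largura : Int) (hw : 0 < largura) (L M R : String) :
    (PySem.List.pyRange 0 largura 1).map
        (fun j => if j == 0 then L else if j == largura - 1 then R else M) =
      hrowAlt largura L M R := by
  unfold hrowAlt
  apply List.ext_getElem
  · simp [PySem.List.length_pyRange_one]
  · intro k h1 h2
    simp only [List.getElem_map, PySem.List.getElem_pyRange_one, List.getElem_set]
    have hk : k < largura.toNat := by
      simpa [PySem.List.length_pyRange_one] using h1
    by_cases hk0 : k = 0
    · subst hk0
      simp
    · have c0 : ((0:Int) + (k:Int) == 0) = false := by simp; omega
      have c2 : ¬ (0 = k) := by omega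
      by_cases hkl : (k:Int) = largura - 1
      · have c1 : ((0:Int) + (k:Int) == largura - 1) = true := by simp; omega
        have c3 : (largura - 1).toNat = k := by omega
        simp [c2, c3, hk0, hkl]
        intro h
        omega
      · have c1 : ((0:Int) + (k:Int) == largura - 1) = false := by simp; omega
        have c3 : ¬ ((largura - 1).toNat = k) := by omega
        have c4 : ¬ (largura.toNat - 1 = k) := by omega
        simp [c2, c3, c4, hk0, hkl]

theorem container_retangulo_spec_aux (altura largura : Int) :
    container_retangulo altura largura = container_retangulo_alt altura largura := by
  rw [contA_eq_map]
  unfold container_retangulo_alt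
  by_cases ha : altura ≤ 0
  · simp [ha, PySem.List.pyRange_one_eq_nil ha]
  · simp only [ha, if_false]
    by_cases hw : largura ≤ 0
    · simp [hw, PySem.List.pyRange_one_eq_nil hw]
    · simp only [hw, if_false]
      push_neg at ha hw
      by_cases h1 : altura = 1
      · subst h1
        simp only [beq_self_eq_true, if_true]
        apply List.ext_getElem
        · simp [PySem.List.length_pyRange_one]
        · intro k hl hr
          have hk : k = 0 := by
            simp [PySem.List.length_pyRange_one] at hl; omega
          subst hk
          simp only [List.getElem_map, PySem.List.getElem_pyRange_one,
            List.getElem_cons_zero, Nat.cast_zero, add_zero]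
          simp only [show ((0:Int) == 0) = true from rfl, if_true]
          rw [row_eq largura hw]
      · have hne : (altura == 1) = false := by simp [h1]
        simp only [hne, Bool.false_eq_true, if_false]
        have h2 : 2 ≤ altura := by omega
        apply List.ext_getElem
        · simp [PySem.List.length_pyRange_one]; omega
        · intro k hl hr
          have hk : k < altura.toNat := by
            simpa [PySem.List.length_pyRange_one] using hl
          simp only [List.getElem_map, PySem.List.getElem_pyRange_one,
            List.append_assoc, List.singleton_append]
          cases k with
          | zero =>
            simp only [List.cons_append, List.getElem_cons_zero]
            simp only [Nat.cast_zero, add_zero, show ((0:Int) == 0) = true from rfl, if_true]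
            rw [row_eq largura hw]
          | succ k' =>
            simp only [List.cons_append, List.getElem_cons_succ]
            have c0 : ((0:Int) + ((k' + 1 : Nat) : Int) == 0) = false := by simp; omega
            by_cases hmid : k' < (altura - 2).toNat
            · have c1 : ((0:Int) + ((k' + 1 : Nat) : Int) == altura - 1) = false := by
                simp; omega
              simp only [c0, c1, Bool.false_eq_true, if_false]
              rw [List.getElem_append_left (by simpa using hmid), List.getElem_replicate,
                row_eq largura hw]
            · have hlast : k' = (altura - 2).toNat := by omega
              have c1 : ((0:Int) + ((k' + 1 : Nat) : Int) == altura - 1) = true := by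
                simp; omega
              simp only [c0, Bool.false_eq_true, if_false, c1, if_true]
              rw [row_eq largura hw, List.getElem_append_right (by simp [hlast])]
              simp [hlast]

-- ===== VERDICT (by name: the statement is the Claim_ definition above) =====
theorem container_retangulo_spec : Claim_equal_container_retangulo := by
  intro altura largura _
  exact container_retangulo_spec_aux altura largura
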